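-- pv_equiv track=rewrite | github.com/k-harada/AtCoder | ARC/ARC105/E.py | solve
-- ===== SOURCE A (Python) =====
-- class UnionFind:
--     def __init__(self, n):
--         self.par = [i for i in range(n+1)]
--         self.rank = [0] * (n+1)
--
--     # search
--     def find(self, x):
--         if self.par[x] == x:
--             return x
--         else:
--             self.par[x] = self.find(self.par[x])
--             return self.par[x]
--
--     # unite
--     def union(self, x, y):
--         x = self.find(x)
--         y = self.find(y)
--         if self.rank[x] < self.rank[y]:
--             self.par[x] = y
--         else:
--             self.par[y] = x
--             if self.rank[x] == self.rank[y]: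
--                 self.rank[x] += 1
--
--     # check
--     def same_check(self, x, y):
--         return self.find(x) == self.find(y)
--
-- def solve(t, case_list):
--     res_list = []
--     for i in range(t):
--         # union-find
--         n, m, edge_list = case_list[i]
--         uf = UnionFind(n)
--         for j in range(m):
--             x, y = edge_list[j]
--             uf.union(x, y)
--         # query parent
--         parent_size = [0] * (n + 1)
--         for p in range(n):
--             parent = uf.find(p + 1)
--             parent_size[parent] += 1
--         # count size
--         s1 = parent_size[uf.find(1)]
--         sn = parent_size[uf.find(n)]
--
--         if n % 2 == 1:
--             edges_left = n * (n - 1) // 2 - m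
--             if edges_left % 2 == 1:
--                 res_list.append("First")
--             else:
--                 res_list.append("Second")
--         else:
--             if (s1 + sn) % 2 == 1:
--                 res_list.append("First")
--             else:
--                 edges_left = n * (n - 1) // 2 - m - s1 * sn
--                 if edges_left % 2 == 1:
--                     res_list.append("First")
--                 else:
--                     res_list.append("Second")
--
--     return res_list
-- ===== SOURCE B (Python) =====
-- def solve(t, case_list):
--     res_list = []
--     for i in range(t):
--         n, m, edge_list = case_list[i]
--         # component labels by repeated relabelling: comp[v] is v's current label
--         comp = list(range(n + 1))
--         for x, y in edge_list[:m]: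
--             a, b = comp[x], comp[y]
--             if a != b:
--                 comp = [a if c == b else c for c in comp]
--         s1 = sum(1 for u in range(1, n + 1) if comp[u] == comp[1])
--         sn = sum(1 for u in range(1, n + 1) if comp[u] == comp[n])
--         if n % 2 == 1:
--             win = (n * (n - 1) // 2 - m) % 2 == 1
--         elif (s1 + sn) % 2 == 1:
--             win = True
--         else:
--             win = (n * (n - 1) // 2 - m - s1 * sn) % 2 == 1
--         res_list.append("First" if win else "Second")
--     return res_list
-- ===== Notes on version B (the rewrite author's own statement) =====
-- stated objective: simpler
-- what changed: A's UnionFind class (path-compressed, rank-based union-find plus a parent_size tally array) is replaced by a plain label list: each edge merges two label classes by one relabelling pass, and the two component sizes are comprehension sums of equal labels.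
-- outside the precondition, e.g. on solve(1, [(2, -1, [(1, 2), (1, 2)])]): A returns ['First'], B returns ['Second']
import Mathlib
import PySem

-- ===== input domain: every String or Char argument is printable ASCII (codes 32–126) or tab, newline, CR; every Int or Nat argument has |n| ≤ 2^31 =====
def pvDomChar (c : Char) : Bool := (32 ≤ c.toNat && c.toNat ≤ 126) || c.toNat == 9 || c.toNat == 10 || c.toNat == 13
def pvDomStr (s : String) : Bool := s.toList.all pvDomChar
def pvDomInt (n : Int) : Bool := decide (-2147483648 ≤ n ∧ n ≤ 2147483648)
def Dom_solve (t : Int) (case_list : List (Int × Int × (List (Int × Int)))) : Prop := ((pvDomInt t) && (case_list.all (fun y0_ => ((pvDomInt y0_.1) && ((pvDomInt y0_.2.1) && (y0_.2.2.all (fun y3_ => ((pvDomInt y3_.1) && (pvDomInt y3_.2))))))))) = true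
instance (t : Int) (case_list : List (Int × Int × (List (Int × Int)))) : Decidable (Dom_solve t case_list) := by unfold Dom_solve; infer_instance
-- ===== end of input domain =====

-- B replaces A's UnionFind class by per-edge component relabelling over a plain label list
-- (objective: simpler — shorter, no class, no recursion); equal return value on Pre_.

-- ===== PORT A =====
-- self.par[x] read / write (Python list indexing, negative indices from the end)
def pyget (xs : List Int) (i : Int) : Int := PySem.List.pyGetD xs i 0
def pyset (xs : List Int) (i v : Int) : List Int := PySem.List.pySetD xs i v

-- UnionFind.find with path compression; Python's recursion is unbounded, the fuel
-- (always passed as par.length) is proved sufficient on every state A reaches inside Pre_.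
def ufFind : Nat → List Int → Int → List Int × Int
  | 0, par, x => (par, pyget par x)
  | f+1, par, x =>
      if pyget par x = x then (par, x)
      else
        let r := ufFind f par (pyget par x)
        (pyset r.1 x r.2, r.2)

-- UnionFind.union (union by rank)
def ufUnion (par rank : List Int) (x y : Int) : List Int × List Int :=
  let fx := ufFind par.length par x
  let fy := ufFind fx.1.length fx.1 y
  let x' := fx.2
  let y' := fy.2
  if pyget rank x' < pyget rank y' then (pyset fy.1 x' y', rank)
  else
    (pyset fy.1 y' x',
     if pyget rank x' = pyget rank y' then pyset rank x' (pyget rank x' + 1) else rank)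

-- the body of A's 'for i in range(t)' loop
def solveCase (c : Int × Int × List (Int × Int)) : String :=
  let n := c.1
  let m := c.2.1
  let edges := c.2.2
  let st := (PySem.List.pyRange 0 m 1).foldl
      (fun (pr : List Int × List Int) j =>
        let e := PySem.List.pyGetD edges j (0, 0)
        ufUnion pr.1 pr.2 e.1 e.2)
      (PySem.List.pyRange 0 (n+1) 1, List.replicate (n+1).toNat 0)
  let st2 := (PySem.List.pyRange 0 n 1).foldl
      (fun (pp : List Int × List Int) p =>
        let f := ufFind pp.1.length pp.1 (p+1)
        (f.1, pyset pp.2 f.2 (pyget pp.2 f.2 + 1)))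
      (st.1, List.replicate (n+1).toNat 0)
  let f1 := ufFind st2.1.length st2.1 1
  let s1 := pyget st2.2 f1.2
  let fn := ufFind f1.1.length f1.1 n
  let sn := pyget st2.2 fn.2
  if PySem.Int.mod n 2 = 1 then
    if PySem.Int.mod (PySem.Int.floordiv (n * (n-1)) 2 - m) 2 = 1 then "First" else "Second"
  else
    if PySem.Int.mod (s1 + sn) 2 = 1 then "First"
    else if PySem.Int.mod (PySem.Int.floordiv (n * (n-1)) 2 - m - s1 * sn) 2 = 1 then "First"
    else "Second"

def solve (t : Int) (case_list : List (Int × Int × (List (Int × Int)))) : List String :=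
  (PySem.List.pyRange 0 t 1).foldl
    (fun res i => res ++ [solveCase (PySem.List.pyGetD case_list i (1, 0, []))]) []

-- ===== PORT B =====
-- merge the label class of y into the label class of x
def relabel (comp : List Int) (x y : Int) : List Int :=
  let a := pyget comp x
  let b := pyget comp y
  if a ≠ b then comp.map (fun c => if c = b then a else c) else comp

-- the body of B's 'for i in range(t)' loop
def solveCaseAlt (c : Int × Int × List (Int × Int)) : String :=
  let n := c.1
  let m := c.2.1
  let edges := c.2.2
  let comp := (PySem.List.slice edges none (some m)).foldl
      (fun comp e => relabel comp e.1 e.2) (PySem.List.pyRange 0 (n+1) 1)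
  let s1 := ((PySem.List.pyRange 1 (n+1) 1).map
      (fun u => if pyget comp u = pyget comp 1 then (1 : Int) else 0)).sum
  let sn := ((PySem.List.pyRange 1 (n+1) 1).map
      (fun u => if pyget comp u = pyget comp n then (1 : Int) else 0)).sum
  let win : Bool :=
    if PySem.Int.mod n 2 = 1 then PySem.Int.mod (PySem.Int.floordiv (n * (n-1)) 2 - m) 2 == 1
    else if PySem.Int.mod (s1 + sn) 2 = 1 then true
    else PySem.Int.mod (PySem.Int.floordiv (n * (n-1)) 2 - m - s1 * sn) 2 == 1
  if win then "First" else "Second"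

def solve_alt (t : Int) (case_list : List (Int × Int × (List (Int × Int)))) : List String :=
  (PySem.List.pyRange 0 t 1).foldl
    (fun res i => res ++ [solveCaseAlt (PySem.List.pyGetD case_list i (1, 0, []))]) []

-- ===== PRECONDITION & SPEC =====
-- Pre_ excludes exactly the inputs where A raises (t or an edge index out of range, n ≤ 0 so
-- that find(1) raises, an edge endpoint outside Python's index range for the parent list) and,
-- being the natural domain, negative edge counts m (there A returns after an empty loop).
def Pre_solve (t : Int) (case_list : List (Int × Int × (List (Int × Int)))) : Prop :=
  t ≤ (case_list.length : Int) ∧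
  ∀ c ∈ case_list.take t.toNat,
    1 ≤ c.1 ∧ 0 ≤ c.2.1 ∧ c.2.1 ≤ (c.2.2.length : Int) ∧
    ∀ e ∈ c.2.2.take c.2.1.toNat,
      -(c.1 + 1) ≤ e.1 ∧ e.1 ≤ c.1 ∧ -(c.1 + 1) ≤ e.2 ∧ e.2 ≤ c.1

instance (t : Int) (case_list : List (Int × Int × (List (Int × Int)))) : Decidable (Pre_solve t case_list) := by
  unfold Pre_solve; infer_instance

def pvWitness_solve : Int × (List (Int × Int × (List (Int × Int)))) :=
  (1, [(2, 1, [(1, 2)])])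

def Spec_solve (t : Int) (case_list : List (Int × Int × (List (Int × Int)))) (out : List String) : Prop := out = solve_alt t case_list
instance (t : Int) (case_list : List (Int × Int × (List (Int × Int)))) (out : List String) : Decidable (Spec_solve t case_list out) := by unfold Spec_solve; infer_instance

-- ===== CLAIM (what is proved, stated in full; the proofs are below) =====
def Claim_equal_solve : Prop := ∀ (t : Int) (case_list : List (Int × Int × (List (Int × Int)))), Dom_solve t case_list → Pre_solve t case_list → Spec_solve t case_list (solve t case_list)

-- ===== LEMMAS AND PROOFS =====

-- ---------- index normalisation ----------
def nxi (L : Nat) (x : Int) : Nat := if 0 ≤ x then x.toNat else L - (-x).toNat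

def vIdx (L : Nat) (x : Int) : Prop := -(L:Int) ≤ x ∧ x < (L:Int)
def inb (L : Nat) (x : Int) : Prop := 0 ≤ x ∧ x < (L:Int)

lemma inb_vIdx {L x} (h : inb L x) : vIdx L x := ⟨by have := h.1; omega, h.2⟩

lemma nxi_lt {L : Nat} {x : Int} (h : vIdx L x) : nxi L x < L := by
  obtain ⟨h1, h2⟩ := h
  unfold nxi
  split <;> omega

lemma nxi_of_nonneg {L : Nat} {x : Int} (h : 0 ≤ x) : nxi L x = x.toNat := by
  simp [nxi, h]

lemma nxi_inj {L : Nat} {x y : Int} (hx : inb L x) (hy : inb L y) (h : nxi L x = nxi L y) : x = y := by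
  obtain ⟨hx1, hx2⟩ := hx; obtain ⟨hy1, hy2⟩ := hy
  rw [nxi_of_nonneg hx1, nxi_of_nonneg hy1] at h
  omega

lemma pyget_eq {L : Nat} (xs : List Int) (x : Int) (hL : xs.length = L) (h : vIdx L x) :
    pyget xs x = xs.getD (nxi L x) 0 := by
  obtain ⟨h1, h2⟩ := h
  unfold pyget nxi
  unfold PySem.List.pyGetD PySem.List.pyGet? PySem.List.pyIdx?
  subst hL
  by_cases h0 : 0 ≤ x
  · rw [if_pos h0, if_pos h0, if_pos (by omega)]
    simp [List.getD_eq_getElem?_getD]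
  · rw [if_neg h0, if_neg h0, if_pos (by omega)]
    simp [List.getD_eq_getElem?_getD]

lemma pyset_eq {L : Nat} (xs : List Int) (x v : Int) (hL : xs.length = L) (h : vIdx L x) :
    pyset xs x v = xs.set (nxi L x) v := by
  obtain ⟨h1, h2⟩ := h
  unfold pyset nxi
  unfold PySem.List.pySetD PySem.List.pySet? PySem.List.pyIdx?
  subst hL
  by_cases h0 : 0 ≤ x
  · rw [if_pos h0, if_pos h0, if_pos (by omega)]
    simp
  · rw [if_neg h0, if_neg h0, if_pos (by omega)]
    simp

lemma length_pyset (xs : List Int) (x v : Int) : (pyset xs x v).length = xs.length := by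
  unfold pyset PySem.List.pySetD PySem.List.pySet? PySem.List.pyIdx?
  split <;> split <;> simp

lemma pyget_pyset {L : Nat} (xs : List Int) (x y v : Int) (hL : xs.length = L)
    (hx : vIdx L x) (hy : vIdx L y) :
    pyget (pyset xs x v) y = if nxi L y = nxi L x then v else pyget xs y := by
  rw [pyset_eq xs x v hL hx,
      pyget_eq (L := L) _ y (by simp [hL]) hy,
      pyget_eq (L := L) xs y hL hy]
  split
  · rename_i hEq
    rw [hEq]
    rw [List.getD_eq_getElem?_getD, List.getElem?_set_self' ]
    have : nxi L x < xs.length := by rw [hL]; exact nxi_lt hx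
    simp [this]
  · rename_i hNe
    rw [List.getD_eq_getElem?_getD, List.getElem?_set_ne (by omega), ← List.getD_eq_getElem?_getD]

lemma pyget_wrap {L : Nat} (xs : List Int) (x : Int) (hL : xs.length = L)
    (hneg : x < 0) (h : vIdx L x) : pyget xs x = pyget xs (x + L) := by
  obtain ⟨hv1, hv2⟩ := h
  have h : vIdx L x := ⟨hv1, hv2⟩
  have hv : vIdx L (x + L) := ⟨by omega, by omega⟩
  rw [pyget_eq xs x hL h, pyget_eq xs (x + L) hL hv]
  congr 1
  unfold nxi
  obtain ⟨h1, h2⟩ := h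
  split <;> split <;> omega

-- ---------- union-find state well-formedness ----------
def ent (L : Nat) (par : List Int) : Prop :=
  par.length = L ∧ ∀ x : Int, vIdx L x → inb L (pyget par x)

def Dd (L : Nat) (d : Int → Nat) (par : List Int) : Prop :=
  ∀ x : Int, inb L x → pyget par x = x ∨ d (pyget par x) < d x

def Good (L : Nat) (par : List Int) : Prop := ent L par ∧ ∃ d, Dd L d par

-- parent-chain reachability with an explicit depth bound
inductive RootD (par : List Int) : Nat → Int → Int → Prop
  | fix (k x) : pyget par x = x → RootD par k x x
  | step (k x r) : pyget par x ≠ x → RootD par k (pyget par x) r → RootD par (k+1) x r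

def RootR (par : List Int) (x r : Int) : Prop := ∃ k, RootD par k x r

lemma rootD_mono {par k x r} (h : RootD par k x r) : ∀ k', k ≤ k' → RootD par k' x r := by
  induction h with
  | fix k x hfix => exact fun k' _ => RootD.fix k' x hfix
  | step k x r hne hrec ih =>
      intro k' hk
      obtain ⟨k'', rfl⟩ : ∃ k'', k' = k'' + 1 := ⟨k' - 1, by omega⟩
      exact RootD.step k'' x r hne (ih k'' (by omega))

lemma rootR_step {par x r} (hne : pyget par x ≠ x) (h : RootR par (pyget par x) r) : RootR par x r := by
  obtain ⟨k, hk⟩ := h; exact ⟨k + 1, RootD.step k x r hne hk⟩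

lemma rootR_fix {par x} (h : pyget par x = x) : RootR par x x := ⟨0, RootD.fix 0 x h⟩

lemma rootR_unique {par x r r'} (h : RootR par x r) (h' : RootR par x r') : r = r' := by
  obtain ⟨k, hk⟩ := h
  obtain ⟨k', hk'⟩ := h'
  induction hk generalizing k' with
  | fix k x hfix =>
      cases hk' with
      | fix => rfl
      | step _ _ _ hne _ => exact absurd hfix hne
  | step k x r hne hrec ih =>
      cases hk' with
      | fix _ _ hfix => exact absurd hfix hne
      | step k2 _ _ _ hrec2 => exact ih _ hrec2

lemma rootR_of_parent {par x r} (hne : pyget par x ≠ x) (h : RootR par x r) :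
    RootR par (pyget par x) r := by
  obtain ⟨k, hk⟩ := h
  cases hk with
  | fix _ _ hfix => exact absurd hfix hne
  | step _ _ _ _ hrec => exact ⟨_, hrec⟩

noncomputable def rootF (par : List Int) (x : Int) : Int :=
  @dite _ (∃ r, RootR par x r) (Classical.propDecidable _) (fun h => h.choose) (fun _ => x)

lemma rootF_eq {par x r} (h : RootR par x r) : rootF par x = r := by
  unfold rootF
  have hex : ∃ r, RootR par x r := ⟨r, h⟩
  rw [dif_pos hex]
  exact rootR_unique hex.choose_spec h

lemma rootF_spec {par x} (h : ∃ r, RootR par x r) : RootR par x (rootF par x) := by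
  unfold rootF
  rw [dif_pos h]
  exact h.choose_spec

-- ---------- termination measure ----------
def meas (L : Nat) (d : Int → Nat) (x : Int) : Nat :=
  ((Finset.range L).filter (fun j : Nat => d (j : Int) < d x)).card

lemma meas_lt {L : Nat} {d : Int → Nat} {x : Int} (h : inb L x) : meas L d x < L := by
  unfold meas
  calc ((Finset.range L).filter (fun j : Nat => d (j : Int) < d x)).card
      < (Finset.range L).card := by
        apply Finset.card_lt_card
        constructor
        · exact Finset.filter_subset _ _
        · intro hsub
          have hx : x.toNat ∈ Finset.range L := by
            simp [Finset.mem_range]; obtain ⟨h1, h2⟩ := h; omega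
          have := hsub hx
          simp only [Finset.mem_filter] at this
          obtain ⟨h1, h2⟩ := h
          rw [Int.toNat_of_nonneg h1] at this
          omega
    _ = L := Finset.card_range L

lemma meas_step {L : Nat} {d : Int → Nat} {x p : Int} (hx : inb L x) (hp : inb L p)
    (hd : d p < d x) : meas L d p < meas L d x := by
  unfold meas
  apply Finset.card_lt_card
  constructor
  · intro j hj
    simp only [Finset.mem_filter] at hj ⊢
    exact ⟨hj.1, lt_trans hj.2 hd⟩
  · intro hsub
    have hpmem : p.toNat ∈ (Finset.range L).filter (fun j : Nat => d (j : Int) < d x) := by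
      simp only [Finset.mem_filter, Finset.mem_range]
      obtain ⟨h1, h2⟩ := hp
      rw [Int.toNat_of_nonneg h1]
      exact ⟨by omega, hd⟩
    have := hsub hpmem
    simp only [Finset.mem_filter] at this
    obtain ⟨h1, h2⟩ := hp
    rw [Int.toNat_of_nonneg h1] at this
    omega

lemma root_exists_depth {L : Nat} {d : Int → Nat} {par : List Int}
    (hE : ent L par) (hD : Dd L d par) :
    ∀ x, inb L x → ∃ r, RootD par (meas L d x) x r ∧ inb L r ∧ pyget par r = r := by
  intro x hx
  generalize hm : meas L d x = M
  induction M using Nat.strong_induction_on generalizing x with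
  | _ M ih =>
    by_cases hfix : pyget par x = x
    · exact ⟨x, RootD.fix _ x hfix, hx, hfix⟩
    · have hp : inb L (pyget par x) := hE.2 x (inb_vIdx hx)
      have hd : d (pyget par x) < d x := (hD x hx).resolve_left hfix
      have hms : meas L d (pyget par x) < M := hm ▸ meas_step hx hp hd
      obtain ⟨r, hr, hrb, hrfix⟩ := ih _ hms (pyget par x) hp rfl
      refine ⟨r, ?_, hrb, hrfix⟩
      have : RootD par (meas L d (pyget par x) + 1) x r := RootD.step _ x r hfix hr
      exact hm ▸ rootD_mono this M (by omega)

lemma root_exists {L : Nat} {par : List Int} (hG : Good L par) :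
    ∀ x, vIdx L x → ∃ r, RootR par x r ∧ inb L r ∧ pyget par r = r := by
  obtain ⟨hE, d, hD⟩ := hG
  intro x hx
  by_cases hxn : 0 ≤ x
  · obtain ⟨r, hr, h1, h2⟩ := root_exists_depth hE hD x ⟨hxn, hx.2⟩
    exact ⟨r, ⟨_, hr⟩, h1, h2⟩
  · have hp : inb L (pyget par x) := hE.2 x hx
    obtain ⟨r, hr, h1, h2⟩ := root_exists_depth hE hD (pyget par x) hp
    have hne : pyget par x ≠ x := by obtain ⟨a, _⟩ := hp; omega
    exact ⟨r, rootR_step hne ⟨_, hr⟩, h1, h2⟩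

-- depth bound < L for every valid start (fuel adequacy for ufFind at fuel L)
lemma root_depth_v {L : Nat} {d : Int → Nat} {par : List Int}
    (hE : ent L par) (hD : Dd L d par) (hL2 : 2 ≤ L) :
    ∀ x, vIdx L x → ∃ r k, RootD par k x r ∧ k < L := by
  intro x hx
  by_cases hxn : 0 ≤ x
  · obtain ⟨r, hr, _, _⟩ := root_exists_depth hE hD x ⟨hxn, hx.2⟩
    exact ⟨r, _, hr, meas_lt ⟨hxn, hx.2⟩⟩
  · have hneg : x < 0 := by omega
    have hj : inb L (x + L) := ⟨by obtain ⟨a, b⟩ := hx; omega, by obtain ⟨a, b⟩ := hx; omega⟩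
    have hwrap : pyget par x = pyget par (x + L) := pyget_wrap par x hE.1 hneg hx
    set p := pyget par (x + L) with hpdef
    have hp : inb L p := hE.2 (x + L) (inb_vIdx hj)
    have hnex : pyget par x ≠ x := by rw [hwrap]; obtain ⟨a, _⟩ := hp; omega
    by_cases hpfix : pyget par p = p
    · refine ⟨p, 1, ?_, by omega⟩
      refine RootD.step 0 x p hnex ?_
      rw [hwrap]
      exact RootD.fix 0 p hpfix
    · have hpj : p ≠ x + L := by
        intro hEq
        apply hpfix
        rw [hEq, ← hpdef]
        exact hEq
      have hd : d p < d (x + L) := by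
        rcases hD (x + L) hj with h | h
        · exact absurd h (by rw [← hpdef]; exact hpj)
        · exact hpdef ▸ h
      have h1 : meas L d p < meas L d (x + L) := meas_step hj hp hd
      have h2 : meas L d (x + L) < L := meas_lt hj
      obtain ⟨r, hr, _, _⟩ := root_exists_depth hE hD p hp
      refine ⟨r, meas L d p + 1, ?_, by omega⟩
      exact RootD.step _ x r hnex (by rw [hwrap]; exact hr)


-- ---------- root properties ----------
lemma rootR_props {L : Nat} {par : List Int} (hG : Good L par) {x r : Int}
    (hx : vIdx L x) (h : RootR par x r) : inb L r ∧ pyget par r = r := by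
  obtain ⟨r', h', hb, hf⟩ := root_exists hG x hx
  rw [rootR_unique h h']
  exact ⟨hb, hf⟩

lemma nxi_wrap {L : Nat} {x : Int} (hneg : x < 0) (h : vIdx L x) :
    nxi L x = nxi L (x + L) := by
  obtain ⟨h1, h2⟩ := h
  unfold nxi
  split <;> split <;> omega

lemma rootR_wrap {L : Nat} {par : List Int} (hE : ent L par) {x : Int}
    (hneg : x < 0) (hx : vIdx L x) (r : Int) :
    RootR par x r ↔ RootR par (x + L) r := by
  obtain ⟨hx1, hx2⟩ := hx
  have hx' : vIdx L x := ⟨hx1, hx2⟩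
  have hj : vIdx L (x + L) := ⟨by omega, by omega⟩
  have hwrap : pyget par x = pyget par (x + L) := pyget_wrap par x hE.1 hneg hx'
  have he : inb L (pyget par (x + L)) := hE.2 (x + L) hj
  have hnex : pyget par x ≠ x := by rw [hwrap]; obtain ⟨a, _⟩ := he; omega
  constructor
  · intro h
    have hrec := rootR_of_parent hnex h
    rw [hwrap] at hrec
    by_cases hfix : pyget par (x + L) = x + L
    · rw [hfix] at hrec; exact hrec
    · exact rootR_step hfix hrec
  · intro h
    by_cases hfix : pyget par (x + L) = x + L
    · have : r = x + L := rootR_unique h (rootR_fix hfix)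
      subst this
      exact rootR_step hnex (by rw [hwrap, hfix]; exact h)
    · exact rootR_step hnex (by rw [hwrap]; exact rootR_of_parent hfix h)

lemma d_root_le {L : Nat} {d : Int → Nat} {par : List Int} (hE : ent L par) (hD : Dd L d par) :
    ∀ {k : Nat} {y r : Int}, RootD par k y r → inb L y → d r ≤ d y := by
  intro k y r hk
  induction hk with
  | fix k y hfix => intro _; exact le_refl _
  | step k y r hne hrec ih =>
      intro hy
      have hp : inb L (pyget par y) := hE.2 y (inb_vIdx hy)
      have : d (pyget par y) < d y := (hD y hy).resolve_left hne
      exact le_trans (ih hp) (by omega)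

lemma rootF_of_good {L : Nat} {par : List Int} (hG : Good L par) {x : Int} (hx : vIdx L x) :
    RootR par x (rootF par x) := by
  obtain ⟨r, h, _, _⟩ := root_exists hG x hx
  exact rootF_spec ⟨r, h⟩

lemma rootF_parent {L : Nat} {par : List Int} (hG : Good L par) {y : Int} (hy : vIdx L y)
    (hne : pyget par y ≠ y) : rootF par y = rootF par (pyget par y) := by
  have h1 := rootF_of_good hG hy
  exact (rootF_eq (rootR_of_parent hne h1)).symm

lemma rootIff_of_impl {L : Nat} {par par' : List Int} (hG : Good L par) (hG' : Good L par')
    (hfwd : ∀ y s, vIdx L y → RootR par y s → RootR par' y s) :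
    ∀ y s, vIdx L y → (RootR par y s ↔ RootR par' y s) := by
  intro y s hy
  constructor
  · exact hfwd y s hy
  · intro h'
    obtain ⟨r, hr, _, _⟩ := root_exists hG y hy
    have := hfwd y r hy hr
    rw [rootR_unique h' this]
    exact hr

-- ---------- writing a node's root into its slot (path compression) preserves roots ----------
lemma set_root_preserve {L : Nat} {d : Int → Nat} {par : List Int}
    (hE : ent L par) (hD : Dd L d par) {x r : Int} (hx : inb L x) (hr : RootR par x r) :
    ent L (pyset par x r) ∧ Dd L d (pyset par x r) ∧
    (∀ y s, vIdx L y → (RootR par y s ↔ RootR (pyset par x r) y s)) := by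
  have hG : Good L par := ⟨hE, d, hD⟩
  obtain ⟨hrb, hrfix⟩ := rootR_props hG (inb_vIdx hx) hr
  have hL : par.length = L := hE.1
  have hL' : (pyset par x r).length = L := by rw [length_pyset]; exact hL
  have hget : ∀ y : Int, vIdx L y →
      pyget (pyset par x r) y = if nxi L y = nxi L x then r else pyget par y :=
    fun y hy => pyget_pyset par x y r hL (inb_vIdx hx) hy
  have hslot : ∀ y : Int, vIdx L y → nxi L y = nxi L x → pyget par x = pyget par y := by
    intro y hy hEq
    rw [pyget_eq par y hL hy, pyget_eq par x hL (inb_vIdx hx), hEq]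
  have hE' : ent L (pyset par x r) := by
    refine ⟨hL', fun y hy => ?_⟩
    rw [hget y hy]
    split
    · exact hrb
    · exact hE.2 y hy
  have hD' : Dd L d (pyset par x r) := by
    intro y hy
    rw [hget y (inb_vIdx hy)]
    split
    · rename_i hEq
      have hyx : y = x := nxi_inj hy hx hEq
      subst hyx
      by_cases hfix : pyget par y = y
      · left
        have : r = y := rootR_unique hr (rootR_fix hfix)
        rw [this]
      · right
        have hrec := rootR_of_parent hfix hr
        have hp : inb L (pyget par y) := hE.2 y (inb_vIdx hy)
        obtain ⟨k, hk⟩ := hrec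
        have h1 : d r ≤ d (pyget par y) := d_root_le hE hD hk hp
        have h2 : d (pyget par y) < d y := (hD y hy).resolve_left hfix
        omega
    · exact hD y hy
  refine ⟨hE', hD', ?_⟩
  apply rootIff_of_impl hG ⟨hE', d, hD'⟩
  have hrfix' : pyget (pyset par x r) r = r := by
    rw [hget r (inb_vIdx hrb)]
    split
    · rfl
    · exact hrfix
  intro y s hy hys
  obtain ⟨k, hk⟩ := hys
  revert hy
  induction hk with
  | fix k z hfixz =>
      intro hz
      by_cases hEq : nxi L z = nxi L x
      · have hq : pyget par x = z := by rw [hslot z hz hEq]; exact hfixz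
        have hrz : r = z := by
          by_cases hxx : pyget par x = x
          · have hxz : x = z := by rw [← hxx, hq]
            exact (rootR_unique hr (rootR_fix hxx)).trans hxz
          · have h2 : RootR par z r := hq ▸ rootR_of_parent hxx hr
            exact rootR_unique h2 (rootR_fix hfixz)
        exact rootR_fix (by rw [hget z hz, if_pos hEq, hrz])
      · exact rootR_fix (by rw [hget z hz, if_neg hEq]; exact hfixz)
  | step k z s hne hrec ih =>
      intro hz
      have hp : inb L (pyget par z) := hE.2 z hz
      have hps := ih (inb_vIdx hp)
      by_cases hEq : nxi L z = nxi L x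
      · have hq : pyget par x = pyget par z := hslot z hz hEq
        have hpr : RootR par (pyget par z) r := by
          by_cases hxx : pyget par x = x
          · have hzx : pyget par z = x := by rw [← hq, hxx]
            rw [hzx]; exact hr
          · exact hq ▸ rootR_of_parent hxx hr
        have hsr : s = r := rootR_unique ⟨k, hrec⟩ hpr
        have hget2 : pyget (pyset par x r) z = r := by rw [hget z hz, if_pos hEq]
        rw [hsr]
        by_cases hrzz : r = z
        · subst hrzz
          exact rootR_fix hget2
        · exact rootR_step (x := z) (by rw [hget2]; exact hrzz)
            (by rw [hget2]; exact rootR_fix hrfix')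
      · exact rootR_step (by rw [hget z hz, if_neg hEq]; exact hne)
          (by rw [hget z hz, if_neg hEq]; exact hps)

lemma set_root_preserve_v {L : Nat} {d : Int → Nat} {par : List Int}
    (hE : ent L par) (hD : Dd L d par) {x r : Int} (hx : vIdx L x) (hr : RootR par x r) :
    ent L (pyset par x r) ∧ Dd L d (pyset par x r) ∧
    (∀ y s, vIdx L y → (RootR par y s ↔ RootR (pyset par x r) y s)) := by
  by_cases h0 : 0 ≤ x
  · exact set_root_preserve hE hD ⟨h0, hx.2⟩ hr
  · obtain ⟨hx1, hx2⟩ := hx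
    have hx' : vIdx L x := ⟨hx1, hx2⟩
    have hneg : x < 0 := by omega
    have hxn : inb L (x + L) := ⟨by omega, by omega⟩
    have hset : pyset par x r = pyset par (x + L) r := by
      rw [pyset_eq par x r hE.1 hx', pyset_eq par (x + L) r hE.1 (inb_vIdx hxn),
          nxi_wrap hneg hx']
    rw [hset]
    exact set_root_preserve hE hD hxn ((rootR_wrap hE hneg hx' r).mp hr)

-- ---------- specification of find (with path compression) ----------
lemma ufFind_spec {L : Nat} {d : Int → Nat} {par : List Int}
    (hE : ent L par) (hD : Dd L d par) :
    ∀ {k : Nat} {x r : Int}, RootD par k x r → ∀ {f : Nat}, k < f → vIdx L x →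
    (ufFind f par x).2 = r ∧ ent L (ufFind f par x).1 ∧ Dd L d (ufFind f par x).1 ∧
    (∀ y s, vIdx L y → (RootR par y s ↔ RootR (ufFind f par x).1 y s)) := by
  intro k x r hk
  induction hk with
  | fix k z hfix =>
      intro f hkf hz
      obtain ⟨f', rfl⟩ : ∃ f', f = f' + 1 := ⟨f - 1, by omega⟩
      have huf : ufFind (f' + 1) par z = (par, z) := by simp [ufFind, hfix]
      rw [huf]
      exact ⟨rfl, hE, hD, fun y s _ => Iff.rfl⟩
  | step k z r hne hrec ih =>
      intro f hkf hz
      obtain ⟨f', rfl⟩ : ∃ f', f = f' + 1 := ⟨f - 1, by omega⟩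
      have hp : inb L (pyget par z) := hE.2 z hz
      have huf : ufFind (f' + 1) par z =
          (pyset (ufFind f' par (pyget par z)).1 z (ufFind f' par (pyget par z)).2,
           (ufFind f' par (pyget par z)).2) := by
        simp [ufFind, hne]
      obtain ⟨ih1, ih2, ih3, ih4⟩ := ih (f := f') (by omega) (inb_vIdx hp)
      have hroot : RootR par z r := ⟨k + 1, RootD.step k z r hne hrec⟩
      have hroot2 : RootR (ufFind f' par (pyget par z)).1 z r := (ih4 z r hz).mp hroot
      obtain ⟨hE2, hD2, hiff⟩ := set_root_preserve_v ih2 ih3 hz (ih1 ▸ hroot2)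
      rw [huf]
      exact ⟨ih1, hE2, hD2, fun y s hy => (ih4 y s hy).trans (hiff y s hy)⟩


-- ---------- linking root a under root b ----------
lemma merge_iff (ru rv rx ry A B : Int) (hAB : (A = rx ∧ B = ry) ∨ (A = ry ∧ B = rx)) :
    ((if ru = A then B else ru) = (if rv = A then B else rv)) ↔
    (ru = rv ∨ (ru = rx ∨ ru = ry) ∧ (rv = rx ∨ rv = ry)) := by
  rcases hAB with ⟨rfl, rfl⟩ | ⟨rfl, rfl⟩ <;> split_ifs <;> omega

lemma link_spec {L : Nat} {d : Int → Nat} {par : List Int} {a b : Int}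
    (hE : ent L par) (hD : Dd L d par) (ha : inb L a) (hb : inb L b)
    (hfa : pyget par a = a) (hfb : pyget par b = b) :
    Good L (pyset par a b) ∧
    ∀ y, vIdx L y → rootF (pyset par a b) y = if rootF par y = a then b else rootF par y := by
  have hG : Good L par := ⟨hE, d, hD⟩
  by_cases hab : a = b
  · subst hab
    obtain ⟨hE', hD', hiff⟩ := set_root_preserve hE hD ha (rootR_fix hfa)
    refine ⟨⟨hE', d, hD'⟩, fun y hy => ?_⟩
    have h1 : RootR (pyset par a a) y (rootF par y) :=
      (hiff y (rootF par y) hy).mp (rootF_of_good hG hy)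
    rw [rootF_eq h1]
    split
    · rename_i h; rw [h]
    · rfl
  · have hL : par.length = L := hE.1
    have hL' : (pyset par a b).length = L := by rw [length_pyset]; exact hL
    have hget : ∀ y : Int, vIdx L y →
        pyget (pyset par a b) y = if nxi L y = nxi L a then b else pyget par y :=
      fun y hy => pyget_pyset par a y b hL (inb_vIdx ha) hy
    have hslot : ∀ y : Int, vIdx L y → nxi L y = nxi L a → pyget par a = pyget par y := by
      intro y hy hEq
      rw [pyget_eq par y hL hy, pyget_eq par a hL (inb_vIdx ha), hEq]
    have hslotb : nxi L b ≠ nxi L a := fun h => hab (nxi_inj hb ha h).symm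
    have hgetb : pyget (pyset par a b) b = b := by
      rw [hget b (inb_vIdx hb), if_neg hslotb]; exact hfb
    have hgeta : pyget (pyset par a b) a = b := by
      rw [hget a (inb_vIdx ha), if_pos rfl]
    have hE' : ent L (pyset par a b) := by
      refine ⟨hL', fun z hz => ?_⟩
      rw [hget z hz]
      split
      · exact hb
      · exact hE.2 z hz
    have hra : rootF par a = a := rootF_eq (rootR_fix hfa)
    have hrb : rootF par b = b := rootF_eq (rootR_fix hfb)
    have hD' : Dd L (fun v => d v + (if rootF par v = a then d b + 1 else 0)) (pyset par a b) := by
      intro z hz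
      rw [hget z (inb_vIdx hz)]
      split
      · rename_i hEq
        have hza : z = a := nxi_inj hz ha hEq
        right
        rw [hza]
        show d b + (if rootF par b = a then d b + 1 else 0) <
          d a + (if rootF par a = a then d b + 1 else 0)
        rw [hrb, hra, if_pos rfl, if_neg (show b ≠ a from fun h => hab h.symm)]
        omega
      · rcases hD z hz with h | h
        · left; exact h
        · right
          have hqne : pyget par z ≠ z := by
            intro hc
            rw [hc] at h
            omega
          have hre : rootF par z = rootF par (pyget par z) := rootF_parent hG (inb_vIdx hz) hqne
          show d (pyget par z) + (if rootF par (pyget par z) = a then d b + 1 else 0) <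
            d z + (if rootF par z = a then d b + 1 else 0)
          rw [← hre]
          omega
    -- the root map after the link
    have hmap : ∀ (k : Nat) (z s : Int), RootD par k z s → vIdx L z →
        RootR (pyset par a b) z (if s = a then b else s) := by
      intro k z s hk
      induction hk with
      | fix k w hfix =>
          intro hw
          have hwb : inb L w := hfix ▸ hE.2 w hw
          by_cases hwa : w = a
          · subst hwa
            rw [if_pos rfl]
            exact rootR_step (x := w) (by rw [hgeta]; exact Ne.symm hab) (by rw [hgeta]; exact rootR_fix hgetb)
          · rw [if_neg hwa]
            refine rootR_fix ?_
            rw [hget w hw, if_neg (fun h => hwa (nxi_inj hwb ha h))]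
            exact hfix
      | step k w s hne hrec ih =>
          intro hw
          have hp : inb L (pyget par w) := hE.2 w hw
          have hps := ih (inb_vIdx hp)
          by_cases hEq : nxi L w = nxi L a
          · have hq : pyget par w = a := by rw [← hslot w hw hEq, hfa]
            have hsa : s = a := rootR_unique ⟨k, hrec⟩
              (show RootR par (pyget par w) a by rw [hq]; exact rootR_fix hfa)
            rw [hsa, if_pos rfl]
            by_cases hbw : b = w
            · subst hbw
              exact rootR_fix (by rw [hget _ hw, if_pos hEq])
            · exact rootR_step (x := w)
                (by rw [hget w hw, if_pos hEq]; exact hbw)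
                (by rw [hget w hw, if_pos hEq]; exact rootR_fix hgetb)
          · exact rootR_step (x := w)
              (by rw [hget w hw, if_neg hEq]; exact hne)
              (by rw [hget w hw, if_neg hEq]; exact hps)
    refine ⟨⟨hE', _, hD'⟩, fun z hz => ?_⟩
    obtain ⟨k, hk⟩ := rootF_of_good hG hz
    exact rootF_eq (hmap k z (rootF par z) hk hz)

-- ---------- specification of union ----------
lemma ufUnion_spec {L : Nat} (hL2 : 2 ≤ L) {par rank : List Int} {x y : Int}
    (hG : Good L par) (hx : vIdx L x) (hy : vIdx L y) :
    Good L (ufUnion par rank x y).1 ∧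
    ∀ u v : Int, vIdx L u → vIdx L v →
      (rootF (ufUnion par rank x y).1 u = rootF (ufUnion par rank x y).1 v ↔
       (rootF par u = rootF par v ∨
        (rootF par u = rootF par x ∨ rootF par u = rootF par y) ∧
        (rootF par v = rootF par x ∨ rootF par v = rootF par y))) := by
  obtain ⟨hE, d, hD⟩ := hG
  have hG : Good L par := ⟨hE, d, hD⟩
  obtain ⟨rx, kx, hkx, hkxL⟩ := root_depth_v hE hD hL2 x hx
  have hfuel1 : par.length = L := hE.1
  obtain ⟨h1, hE1, hD1, hiff1⟩ := ufFind_spec hE hD hkx (f := par.length) (by omega) hx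
  set fx := ufFind par.length par x with hfx
  have hG1 : Good L fx.1 := ⟨hE1, d, hD1⟩
  have hrfx : rootF par x = rx := rootF_eq ⟨kx, hkx⟩
  obtain ⟨ry, ky, hky, hkyL⟩ := root_depth_v hE1 hD1 hL2 y hy
  have hfuel2 : fx.1.length = L := hE1.1
  obtain ⟨h2, hE2, hD2, hiff2⟩ := ufFind_spec hE1 hD1 hky (f := fx.1.length) (by omega) hy
  set fy := ufFind fx.1.length fx.1 y with hfy
  have hG2 : Good L fy.1 := ⟨hE2, d, hD2⟩
  have hiff12 : ∀ z s, vIdx L z → (RootR par z s ↔ RootR fy.1 z s) :=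
    fun z s hz => (hiff1 z s hz).trans (hiff2 z s hz)
  have hrfy : rootF par y = ry := by
    have := (hiff1 y ry hy).mpr ⟨ky, hky⟩
    exact rootF_eq this
  have hRF : ∀ z, vIdx L z → rootF fy.1 z = rootF par z := by
    intro z hz
    exact rootF_eq ((hiff12 z (rootF par z) hz).mp (rootF_of_good hG hz))
  have hrx2 : RootR fy.1 x rx := (hiff12 x rx hx).mp ⟨kx, hkx⟩
  have hry2 : RootR fy.1 y ry := (hiff12 y ry hy).mp ((hiff1 y ry hy).mpr ⟨ky, hky⟩)
  obtain ⟨hrxb, hrxf⟩ := rootR_props hG2 hx hrx2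
  obtain ⟨hryb, hryf⟩ := rootR_props hG2 hy hry2
  have hgoal : ∀ (a b : Int), inb L a → inb L b → pyget fy.1 a = a → pyget fy.1 b = b →
      ((a = rx ∧ b = ry) ∨ (a = ry ∧ b = rx)) →
      Good L (pyset fy.1 a b) ∧
      (∀ u v : Int, vIdx L u → vIdx L v →
        (rootF (pyset fy.1 a b) u = rootF (pyset fy.1 a b) v ↔
         (rootF par u = rootF par v ∨
          (rootF par u = rootF par x ∨ rootF par u = rootF par y) ∧
          (rootF par v = rootF par x ∨ rootF par v = rootF par y)))) := by
    intro a b hainb hbinb hafix hbfix hABr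
    obtain ⟨hGd', hmap⟩ := link_spec hE2 hD2 hainb hbinb hafix hbfix
    refine ⟨hGd', fun u v hu hv => ?_⟩
    rw [hmap u hu, hmap v hv, hRF u hu, hRF v hv, hrfx, hrfy]
    have hBA : (a = rootF par x ∧ b = rootF par y) ∨ (a = rootF par y ∧ b = rootF par x) := by
      rw [hrfx, hrfy]; exact hABr
    rw [hrfx, hrfy] at hBA
    exact merge_iff _ _ _ _ _ _ hBA
  have hun : ufUnion par rank x y =
      (if pyget rank fx.2 < pyget rank fy.2 then (pyset fy.1 fx.2 fy.2, rank)
       else (pyset fy.1 fy.2 fx.2,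
         if pyget rank fx.2 = pyget rank fy.2 then pyset rank fx.2 (pyget rank fx.2 + 1) else rank)) := rfl
  rw [hun, h1, h2]
  split
  · exact hgoal rx ry hrxb hryb hrxf hryf (Or.inl ⟨rfl, rfl⟩)
  · exact hgoal ry rx hryb hrxb hryf hrxf (Or.inr ⟨rfl, rfl⟩)


-- ---------- B's relabelling step ----------
lemma pyget_map {L : Nat} (comp : List Int) (f : Int → Int) (u : Int)
    (hL : comp.length = L) (hu : vIdx L u) :
    pyget (comp.map f) u = f (pyget comp u) := by
  rw [pyget_eq (L := L) (comp.map f) u (by simp [hL]) hu, pyget_eq comp u hL hu]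
  have hlt : nxi L u < comp.length := by rw [hL]; exact nxi_lt hu
  rw [List.getD_eq_getElem?_getD, List.getD_eq_getElem?_getD, List.getElem?_map,
      List.getElem?_eq_getElem hlt]
  simp

lemma relabel_step {L : Nat} (comp : List Int) (x y : Int)
    (hL : comp.length = L) (hx : vIdx L x) (hy : vIdx L y) :
    (relabel comp x y).length = L ∧
    ∀ u, vIdx L u → pyget (relabel comp x y) u =
      (if pyget comp u = pyget comp y then pyget comp x else pyget comp u) := by
  simp only [relabel]
  split
  · refine ⟨by simp [hL], fun u hu => ?_⟩
    rw [pyget_map comp _ u hL hu]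
  · rename_i h
    rw [not_not] at h
    refine ⟨hL, fun u hu => ?_⟩
    split
    · rename_i h2
      rw [h, ← h2]
    · rfl

lemma ite_merge (a b lu lv : Int) :
    ((if lu = b then a else lu) = (if lv = b then a else lv)) ↔
    (lu = lv ∨ (lu = a ∨ lu = b) ∧ (lv = a ∨ lv = b)) := by
  split_ifs <;> omega

-- ---------- the edge loop: union-find and relabelling induce the same partition ----------
lemma merge_loop {L : Nat} (hL2 : 2 ≤ L) :
    ∀ (el : List (Int × Int)) (par rank comp : List Int),
    Good L par → comp.length = L →
    (∀ e ∈ el, vIdx L e.1 ∧ vIdx L e.2) →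
    (∀ u v : Int, vIdx L u → vIdx L v →
       (rootF par u = rootF par v ↔ pyget comp u = pyget comp v)) →
    Good L (el.foldl (fun pr e => ufUnion pr.1 pr.2 e.1 e.2) (par, rank)).1 ∧
    (el.foldl (fun c e => relabel c e.1 e.2) comp).length = L ∧
    (∀ u v : Int, vIdx L u → vIdx L v →
       (rootF (el.foldl (fun pr e => ufUnion pr.1 pr.2 e.1 e.2) (par, rank)).1 u =
        rootF (el.foldl (fun pr e => ufUnion pr.1 pr.2 e.1 e.2) (par, rank)).1 v ↔
        pyget (el.foldl (fun c e => relabel c e.1 e.2) comp) u =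
        pyget (el.foldl (fun c e => relabel c e.1 e.2) comp) v)) := by
  intro el
  induction el with
  | nil =>
      intro par rank comp hGp hCL hev hinv
      exact ⟨hGp, hCL, hinv⟩
  | cons e el ih =>
      intro par rank comp hGp hCL hev hinv
      obtain ⟨hve, hvf⟩ := hev e List.mem_cons_self
      obtain ⟨hG', hiff'⟩ := ufUnion_spec (rank := rank) hL2 hGp hve hvf
      obtain ⟨hCL', hlab⟩ := relabel_step comp e.1 e.2 hCL hve hvf
      simp only [List.foldl_cons]
      exact ih (ufUnion par rank e.1 e.2).1 (ufUnion par rank e.1 e.2).2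
        (relabel comp e.1 e.2) hG' hCL'
        (fun e' he' => hev e' (List.mem_cons_of_mem _ he'))
        (by
          intro u v hu hv
          rw [hiff' u v hu hv, hlab u hu, hlab v hv, ite_merge,
              ← hinv u v hu hv, ← hinv u e.1 hu hve, ← hinv u e.2 hu hvf,
              ← hinv v e.1 hv hve, ← hinv v e.2 hv hvf])


-- ---------- initial state: list(range(n+1)) ----------
lemma nxi_cast {L : Nat} (u : Int) (hu : vIdx L u) :
    ((nxi L u : Nat) : Int) = if 0 ≤ u then u else u + L := by
  obtain ⟨h1, h2⟩ := hu
  unfold nxi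
  split <;> omega

lemma pyget_range {L : Nat} {n1 : Int} (hn : n1.toNat = L) (u : Int) (hu : vIdx L u) :
    pyget (PySem.List.pyRange 0 n1 1) u = ((nxi L u : Nat) : Int) := by
  have hlen : (PySem.List.pyRange 0 n1 1).length = L := by
    rw [PySem.List.length_pyRange_one]
    omega
  rw [pyget_eq _ u hlen hu]
  have hlt : nxi L u < (PySem.List.pyRange 0 n1 1).length := by rw [hlen]; exact nxi_lt hu
  rw [List.getD_eq_getElem?_getD, List.getElem?_eq_getElem hlt]
  rw [PySem.List.getElem_pyRange_one]
  simp

lemma good_range {L : Nat} {n1 : Int} (hn : n1.toNat = L) :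
    Good L (PySem.List.pyRange 0 n1 1) := by
  have hlen : (PySem.List.pyRange 0 n1 1).length = L := by
    rw [PySem.List.length_pyRange_one]
    omega
  refine ⟨⟨hlen, fun u hu => ?_⟩, fun _ => 0, fun u hu => ?_⟩
  · rw [pyget_range hn u hu]
    exact ⟨by positivity, by exact_mod_cast nxi_lt hu⟩
  · left
    rw [pyget_range hn u (inb_vIdx hu), nxi_cast u (inb_vIdx hu), if_pos hu.1]

lemma root_range {L : Nat} {n1 : Int} (hn : n1.toNat = L) (u : Int) (hu : vIdx L u) :
    rootF (PySem.List.pyRange 0 n1 1) u = ((nxi L u : Nat) : Int) := by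
  have hg := pyget_range hn u hu
  by_cases h0 : 0 ≤ u
  · have : pyget (PySem.List.pyRange 0 n1 1) u = u := by
      rw [hg, nxi_cast u hu, if_pos h0]
    rw [rootF_eq (rootR_fix this), nxi_cast u hu, if_pos h0]
  · have hc : ((nxi L u : Nat) : Int) = u + L := by rw [nxi_cast u hu, if_neg h0]
    have hj : vIdx L (u + L) := ⟨by obtain ⟨a, b⟩ := hu; omega, by obtain ⟨a, b⟩ := hu; omega⟩
    have hjb : 0 ≤ u + (L : Int) := by obtain ⟨a, b⟩ := hu; omega
    have hfix : pyget (PySem.List.pyRange 0 n1 1) (u + L) = u + L := by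
      rw [pyget_range hn _ hj, nxi_cast _ hj, if_pos hjb]
    have hne : pyget (PySem.List.pyRange 0 n1 1) u ≠ u := by
      rw [hg, hc]
      obtain ⟨a, b⟩ := hu
      intro hx
      omega
    refine (rootF_eq (rootR_step hne ?_)).trans hc.symm
    rw [hg, hc]
    exact rootR_fix hfix

-- ---------- indexing loop over range(m) is a fold over take ----------
lemma foldl_pyRange_index {α β : Type} (edges : List α) (dflt : α) (m : Int) (h0 : 0 ≤ m)
    (hm : m ≤ (edges.length : Int)) (g : β → α → β) (init : β) :
    (PySem.List.pyRange 0 m 1).foldl (fun acc j => g acc (PySem.List.pyGetD edges j dflt)) init =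
    (edges.take m.toNat).foldl g init := by
  have hlen : PySem.List.len (edges.take m.toNat) = m := by
    simp [PySem.List.len_eq]
    omega
  rw [← PySem.List.foldl_pyRange_zero_pyGetD (edges.take m.toNat) dflt g init, hlen]
  apply PySem.List.foldl_congr_mem
  intro acc j hj
  rw [PySem.List.mem_pyRange_one] at hj
  congr 1
  rw [PySem.List.pyGetD_of_nonneg _ _ hj.1, PySem.List.pyGetD_of_nonneg _ _ hj.1]
  rw [List.getD_eq_getElem?_getD, List.getD_eq_getElem?_getD, List.getElem?_take]
  rw [if_pos (by omega)]

-- ---------- count loop: parent_size tallies roots ----------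
def cntStep (pp : List Int × List Int) (p : Int) : List Int × List Int :=
  (((ufFind pp.1.length pp.1 (p+1)).1),
   pyset pp.2 (ufFind pp.1.length pp.1 (p+1)).2
     (pyget pp.2 (ufFind pp.1.length pp.1 (p+1)).2 + 1))

lemma count_loop {L : Nat} (hL2 : 2 ≤ L) :
    ∀ (ps : List Int) (par psize : List Int),
    Good L par → psize.length = L →
    (∀ p ∈ ps, 0 ≤ p ∧ p + 1 < (L : Int)) →
    Good L ((ps.foldl cntStep (par, psize)).1) ∧
    (∀ z, vIdx L z → rootF (ps.foldl cntStep (par, psize)).1 z = rootF par z) ∧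
    (ps.foldl cntStep (par, psize)).2.length = L ∧
    (∀ q : Int, inb L q →
      pyget (ps.foldl cntStep (par, psize)).2 q =
        pyget psize q + ((ps.filter (fun p => decide (rootF par (p+1) = q))).length : Int)) := by
  intro ps
  induction ps with
  | nil =>
      intro par psize hG hPL hps
      exact ⟨hG, fun z _ => rfl, hPL, fun q _ => by simp⟩
  | cons p ps ih =>
      intro par psize hG hPL hps
      obtain ⟨hp0, hp1⟩ := hps p List.mem_cons_self
      obtain ⟨hE, d, hD⟩ := hG
      have hGp : Good L par := ⟨hE, d, hD⟩
      have hw : inb L (p + 1) := ⟨by omega, hp1⟩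
      obtain ⟨r, k, hk, hkL⟩ := root_depth_v hE hD hL2 (p+1) (inb_vIdx hw)
      have hfuel : par.length = L := hE.1
      obtain ⟨h1, hE1, hD1, hiff1⟩ := ufFind_spec hE hD hk (f := par.length) (by omega) (inb_vIdx hw)
      have hrval : rootF par (p+1) = r := rootF_eq ⟨k, hk⟩
      have hG1 : Good L (ufFind par.length par (p+1)).1 := ⟨hE1, d, hD1⟩
      have hpres1 : ∀ z, vIdx L z → rootF (ufFind par.length par (p+1)).1 z = rootF par z := by
        intro z hz
        exact rootF_eq ((hiff1 z (rootF par z) hz).mp (rootF_of_good hGp hz))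
      obtain ⟨hrb, _⟩ := rootR_props hGp (inb_vIdx hw) ⟨k, hk⟩
      have hstep : cntStep (par, psize) p =
          ((ufFind par.length par (p+1)).1, pyset psize r (pyget psize r + 1)) := by
        simp only [cntStep, h1]
      have hPL' : (pyset psize r (pyget psize r + 1)).length = L := by
        rw [length_pyset]; exact hPL
      have hget' : ∀ q : Int, inb L q →
          pyget (pyset psize r (pyget psize r + 1)) q =
            pyget psize q + (if q = r then 1 else 0) := by
        intro q hq
        rw [pyget_pyset psize r q _ hPL (inb_vIdx hrb) (inb_vIdx hq)]
        split
        · rename_i hEq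
          rw [nxi_inj hq hrb hEq, if_pos rfl]
        · rename_i hNe
          rw [if_neg (fun hc => hNe (by rw [hc]))]
          omega
      obtain ⟨ihG, ihpres, ihlen, ihcnt⟩ := ih (ufFind par.length par (p+1)).1
        (pyset psize r (pyget psize r + 1)) hG1 hPL'
        (fun p' hp' => hps p' (List.mem_cons_of_mem _ hp'))
      rw [List.foldl_cons, hstep]
      refine ⟨ihG, ?_, ihlen, ?_⟩
      · intro z hz
        rw [ihpres z hz, hpres1 z hz]
      · intro q hq
        rw [ihcnt q hq, hget' q hq]
        have hfiltcong :
            ps.filter (fun p' => decide (rootF (ufFind par.length par (p+1)).1 (p'+1) = q)) =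
            ps.filter (fun p' => decide (rootF par (p'+1) = q)) := by
          apply List.filter_congr
          intro p' hp'
          have h0' := (hps p' (List.mem_cons_of_mem _ hp')).1
          have h1' := (hps p' (List.mem_cons_of_mem _ hp')).2
          rw [hpres1 (p'+1) (inb_vIdx ⟨by omega, h1'⟩)]
        rw [hfiltcong, List.filter_cons]
        simp only [hrval]
        by_cases hqr : q = r
        · rw [if_pos hqr, if_pos (show decide (r = q) = true by
            simp only [decide_eq_true_eq]; exact hqr.symm)]
          simp only [List.length_cons]
          push_cast
          omega
        · rw [if_neg hqr, if_neg (show ¬ decide (r = q) = true by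
            simp only [decide_eq_true_eq]; exact fun h => hqr h.symm)]
          omega


-- ---------- the final game formula ----------
lemma formula_eq (n m s1 sn : Int) :
    (if PySem.Int.mod n 2 = 1 then
        if PySem.Int.mod (PySem.Int.floordiv (n * (n-1)) 2 - m) 2 = 1 then "First" else "Second"
      else if PySem.Int.mod (s1 + sn) 2 = 1 then "First"
      else if PySem.Int.mod (PySem.Int.floordiv (n * (n-1)) 2 - m - s1 * sn) 2 = 1 then "First"
      else "Second") =
    (if (if PySem.Int.mod n 2 = 1 then (PySem.Int.mod (PySem.Int.floordiv (n * (n-1)) 2 - m) 2 == 1)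
         else if PySem.Int.mod (s1 + sn) 2 = 1 then true
         else (PySem.Int.mod (PySem.Int.floordiv (n * (n-1)) 2 - m - s1 * sn) 2 == 1)) = true
     then "First" else "Second") := by
  split_ifs <;> try simp_all
  all_goals omega

-- ---------- a single test case ----------
lemma case_eq (c : Int × Int × List (Int × Int))
    (h1 : 1 ≤ c.1) (h2 : 0 ≤ c.2.1) (h3 : c.2.1 ≤ (c.2.2.length : Int))
    (h4 : ∀ e ∈ c.2.2.take c.2.1.toNat,
      -(c.1 + 1) ≤ e.1 ∧ e.1 ≤ c.1 ∧ -(c.1 + 1) ≤ e.2 ∧ e.2 ≤ c.1) :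
    solveCase c = solveCaseAlt c := by
  obtain ⟨n, m, edges⟩ := c
  simp only at h1 h2 h3 h4
  have hL2 : 2 ≤ (n + 1).toNat := by omega
  set L := (n + 1).toNat with hLdef
  have hcast : ((L : Nat) : Int) = n + 1 := by omega
  -- the initial parent list / label list
  have hG0 : Good L (PySem.List.pyRange 0 (n+1) 1) := good_range (by omega)
  have hlen0 : (PySem.List.pyRange 0 (n+1) 1).length = L := hG0.1.1
  have hinv0 : ∀ u v : Int, vIdx L u → vIdx L v →
      (rootF (PySem.List.pyRange 0 (n+1) 1) u = rootF (PySem.List.pyRange 0 (n+1) 1) v ↔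
       pyget (PySem.List.pyRange 0 (n+1) 1) u = pyget (PySem.List.pyRange 0 (n+1) 1) v) := by
    intro u v hu hv
    rw [root_range (by omega) u hu, root_range (by omega) v hv,
        pyget_range (by omega) u hu, pyget_range (by omega) v hv]
  set el := edges.take m.toNat with helDef
  have hev : ∀ e ∈ el, vIdx L e.1 ∧ vIdx L e.2 := by
    intro e he
    obtain ⟨ha, hb, hc, hd⟩ := h4 e he
    exact ⟨⟨by omega, by omega⟩, ⟨by omega, by omega⟩⟩
  obtain ⟨hGA, hCL, hinv⟩ := merge_loop hL2 el (PySem.List.pyRange 0 (n+1) 1)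
    (List.replicate L (0:Int)) (PySem.List.pyRange 0 (n+1) 1) hG0 hlen0 hev hinv0
  set parst := (el.foldl (fun pr e => ufUnion pr.1 pr.2 e.1 e.2)
      (PySem.List.pyRange 0 (n+1) 1, List.replicate L (0:Int))) with hparst
  set comp := el.foldl (fun c e => relabel c e.1 e.2) (PySem.List.pyRange 0 (n+1) 1) with hcomp
  -- the counting loop
  have hps : ∀ p ∈ PySem.List.pyRange 0 n 1, 0 ≤ p ∧ p + 1 < (L : Int) := by
    intro p hp
    rw [PySem.List.mem_pyRange_one] at hp
    exact ⟨hp.1, by omega⟩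
  have hrep : ∀ q : Int, vIdx L q → pyget (List.replicate L (0:Int)) q = 0 := by
    intro q hq
    rw [pyget_eq _ q (by simp) hq, List.getD_eq_getElem?_getD]
    simp [nxi_lt hq]
  obtain ⟨hG2, hpres2, hlen2, hcnt2⟩ := count_loop hL2 (PySem.List.pyRange 0 n 1)
    parst.1 (List.replicate L (0:Int)) hGA (by simp) hps
  set st2 := (PySem.List.pyRange 0 n 1).foldl cntStep (parst.1, List.replicate L (0:Int)) with hst2
  -- the two final finds of A
  have hv1 : vIdx L 1 := ⟨by omega, by omega⟩
  have hvn : vIdx L n := ⟨by omega, by omega⟩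
  obtain ⟨hE2, d2, hD2⟩ := hG2
  have hG2' : Good L st2.1 := ⟨hE2, d2, hD2⟩
  obtain ⟨r1, k1, hk1, hk1L⟩ := root_depth_v hE2 hD2 hL2 1 hv1
  obtain ⟨hf1v, hf1E, hf1D, hf1iff⟩ := ufFind_spec hE2 hD2 hk1 (f := st2.1.length)
    (by rw [hE2.1]; omega) hv1
  set f1 := ufFind st2.1.length st2.1 1 with hf1
  have hG3 : Good L f1.1 := ⟨hf1E, d2, hf1D⟩
  have hr1 : rootF st2.1 1 = r1 := rootF_eq ⟨k1, hk1⟩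
  obtain ⟨rn, kn, hkn, hknL⟩ := root_depth_v hf1E hf1D hL2 n hvn
  obtain ⟨hfnv, _, _, _⟩ := ufFind_spec hf1E hf1D hkn (f := f1.1.length)
    (by rw [hf1E.1]; omega) hvn
  have hrn : rootF st2.1 n = rn := by
    have := (hf1iff n rn hvn).mpr ⟨kn, hkn⟩
    exact rootF_eq this
  -- the tallies are counts of equal roots, i.e. counts of equal labels
  have hinb1 : inb L r1 := (rootR_props hG2' hv1 ⟨k1, hk1⟩).1
  have hinbn : inb L rn := by
    refine (rootR_props hG2' hvn ?_).1
    rw [← hrn]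
    exact rootF_of_good hG2' hvn
  have hcount : ∀ w : Int, vIdx L w →
      pyget st2.2 (rootF st2.1 w) =
      ((PySem.List.pyRange 1 (n+1) 1).map
        (fun u => if pyget comp u = pyget comp w then (1:Int) else 0)).sum := by
    intro w hw
    have hrw : rootF st2.1 w = rootF parst.1 w := hpres2 w hw
    have hq : inb L (rootF st2.1 w) := (rootR_props hG2' hw (rootF_of_good hG2' hw)).1
    rw [hcnt2 _ hq, hrep _ (inb_vIdx hq)]
    have hsum := PySem.List.sum_map_ite_one_zero
      (fun u => decide (pyget comp u = pyget comp w)) (PySem.List.pyRange 1 (n+1) 1)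
    simp only [decide_eq_true_eq] at hsum
    rw [hsum, zero_add, ← List.countP_eq_length_filter,
        PySem.List.pyRange_one 0 n, PySem.List.pyRange_one 1 (n+1),
        List.countP_map, List.countP_map]
    have hnn : (n - 0).toNat = (n + 1 - 1).toNat := by omega
    rw [hnn]
    congr 1
    apply List.countP_congr
    intro k hk
    rw [List.mem_range] at hk
    have hu : inb L (1 + (k : Int)) := ⟨by omega, by omega⟩
    simp only [Function.comp_apply, decide_eq_true_eq]
    rw [hrw, show ((0:Int) + (k:Int)) + 1 = 1 + (k:Int) by ring]
    exact hinv (1 + (k:Int)) w (inb_vIdx hu) hw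
  -- the two tallies equal B's two sums
  have hs1 : pyget st2.2 f1.2 =
      ((PySem.List.pyRange 1 (n+1) 1).map
        (fun u => if pyget comp u = pyget comp 1 then (1:Int) else 0)).sum := by
    rw [hf1v, ← hr1]
    exact hcount 1 hv1
  have hsn : pyget st2.2 (ufFind f1.1.length f1.1 n).2 =
      ((PySem.List.pyRange 1 (n+1) 1).map
        (fun u => if pyget comp u = pyget comp n then (1:Int) else 0)).sum := by
    rw [hfnv, ← hrn]
    exact hcount n hvn
  -- assemble
  simp only [solveCase, solveCaseAlt]
  rw [← hLdef]
  rw [show PySem.List.slice edges none (some m) = edges.take m.toNat from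
    PySem.List.slice_to edges h2, ← helDef, ← hcomp]
  have hAloop : (PySem.List.pyRange 0 m 1).foldl
      (fun (pr : List Int × List Int) j =>
        ufUnion pr.1 pr.2 (PySem.List.pyGetD edges j ((0:Int), (0:Int))).1
          (PySem.List.pyGetD edges j ((0:Int), (0:Int))).2)
      (PySem.List.pyRange 0 (n+1) 1, List.replicate L (0:Int)) =
      el.foldl (fun pr e => ufUnion pr.1 pr.2 e.1 e.2)
        (PySem.List.pyRange 0 (n+1) 1, List.replicate L (0:Int)) := by
    rw [helDef]
    exact foldl_pyRange_index edges (0,0) m h2 h3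
      (fun pr e => ufUnion pr.1 pr.2 e.1 e.2)
      (PySem.List.pyRange 0 (n+1) 1, List.replicate L (0:Int))
  rw [hAloop, ← hparst]
  have hcs : (fun (pp : List Int × List Int) p =>
      ((ufFind pp.1.length pp.1 (p+1)).1,
       pyset pp.2 (ufFind pp.1.length pp.1 (p+1)).2
         (pyget pp.2 (ufFind pp.1.length pp.1 (p+1)).2 + 1))) = cntStep := rfl
  rw [hcs, ← hst2, ← hf1, hs1, hsn]
  exact formula_eq n m _ _

-- ===== VERDICT (by name: the statement is the Claim_ definition above) =====
theorem solve_spec : Claim_equal_solve := by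
  intro t case_list hDom hPre
  obtain ⟨hT, hC⟩ := hPre
  show solve t case_list = solve_alt t case_list
  unfold solve solve_alt
  rw [PySem.List.foldl_append_singleton_eq_map, PySem.List.foldl_append_singleton_eq_map]
  simp only [List.nil_append]
  apply List.map_congr_left
  intro i hi
  rw [PySem.List.mem_pyRange_one] at hi
  have hilen : i.toNat < case_list.length := by omega
  have hgd : PySem.List.pyGetD case_list i ((1:Int), (0:Int), ([] : List (Int × Int))) =
      case_list[i.toNat] := by
    rw [PySem.List.pyGetD_of_nonneg _ _ hi.1, List.getD_eq_getElem?_getD,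
        List.getElem?_eq_getElem hilen]
    rfl
  rw [hgd]
  have hmem : case_list[i.toNat] ∈ case_list.take t.toNat := by
    have hlt : i.toNat < (case_list.take t.toNat).length := by
      simp [List.length_take]
      omega
    have hmem' := List.getElem_mem hlt
    rwa [List.getElem_take] at hmem'
  obtain ⟨p1, p2, p3, p4⟩ := hC _ hmem
  exact case_eq _ p1 p2 p3 p4
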